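-- pv_equiv track=rewrite | github.com/cdccnleo/RQA2025 | batch_fix_remaining.py | fix_duplicate_methods_and_indent
-- ===== SOURCE A (Python) =====
-- def fix_duplicate_methods_and_indent(content):
--     """修复重复方法定义和缩进问题"""
--     lines = content.split('\n')
--     fixed_lines = []
--
--     i = 0
--     while i < len(lines):
--         line = lines[i].rstrip()
--
--         # 检查是否是空的方法定义
--         if line.startswith('    def ') and line.endswith(':') and not line.endswith('"""'):
--             method_name = line.split('(')[0].strip()
--
--             # 检查下一行是否是相同的完整方法定义
--             if i + 1 < len(lines):
--                 next_line = lines[i + 1].rstrip()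
--                 if (next_line.startswith('    def ') and
--                     next_line.split('(')[0].strip() == method_name and
--                         '"""' in next_line):
--                     # 跳过空的方法定义
--                     i += 1
--                     continue
--
--         fixed_lines.append(lines[i])
--         i += 1
--
--     content = '\n'.join(fixed_lines)
--
--     # 修复缩进问题 - 简单的方法：确保方法体内的代码至少有8个空格缩进
--     lines = content.split('\n')
--     fixed_lines = []
--     in_method = False
--
--     for line in lines:
--         stripped = line.rstrip()
--         if not stripped:
--             fixed_lines.append('')
--             continue
--
--         # 检查是否进入方法
--         if stripped.startswith('    def '):
--             in_method = True
--             fixed_lines.append(line)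
--         elif stripped.startswith('class '):
--             in_method = False
--             fixed_lines.append(line)
--         elif in_method and stripped and not stripped.startswith('    ') and not stripped.startswith('        '):
--             # 方法体内的代码应该有至少8个空格的缩进
--             fixed_lines.append('        ' + stripped.lstrip())
--         else:
--             fixed_lines.append(line)
--
--     return '\n'.join(fixed_lines)
-- ===== SOURCE B (Python) =====
-- def fix_duplicate_methods_and_indent(content):
--     """Single fused pass: skip empty duplicate defs and fix indentation inline."""
--     lines = content.split('\n')
--     out = []
--     in_method = False
--     i = 0
--     n = len(lines)
--     while i < n:
--         raw = lines[i]
--         line = raw.rstrip()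
--         # duplicate-skip rule: an empty '    def ...:' followed by the real def
--         if line.startswith('    def ') and line.endswith(':') and i + 1 < n:
--             nxt = lines[i + 1].rstrip()
--             if (nxt.startswith('    def ')
--                     and nxt.split('(')[0].strip() == line.split('(')[0].strip()
--                     and '"""' in nxt):
--                 i += 1
--                 continue
--         # indentation rule, applied inline to every kept line
--         if not line:
--             out.append('')
--         elif line.startswith('    def '):
--             in_method = True
--             out.append(raw)
--         elif line.startswith('class '):
--             in_method = False
--             out.append(raw)
--         elif in_method and not line.startswith('    '):
--             out.append('        ' + line.lstrip())
--         else: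
--             out.append(raw)
--         i += 1
--     return '\n'.join(out)
-- ===== Notes on version B (the rewrite author's own statement) =====
-- stated objective: simpler
-- what changed: A's two sequential passes (remove duplicate empty defs, join, re-split, then fix indentation with an in_method flag) are fused into one indexed traversal that applies the duplicate-skip rule and the indentation rule inline, building a single output list and joining once; two redundant sub-tests (a line ending in a colon can never end in a triple quote, and the 8-space prefix test is subsumed by the 4-space one) are dropped.
import Mathlib
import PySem

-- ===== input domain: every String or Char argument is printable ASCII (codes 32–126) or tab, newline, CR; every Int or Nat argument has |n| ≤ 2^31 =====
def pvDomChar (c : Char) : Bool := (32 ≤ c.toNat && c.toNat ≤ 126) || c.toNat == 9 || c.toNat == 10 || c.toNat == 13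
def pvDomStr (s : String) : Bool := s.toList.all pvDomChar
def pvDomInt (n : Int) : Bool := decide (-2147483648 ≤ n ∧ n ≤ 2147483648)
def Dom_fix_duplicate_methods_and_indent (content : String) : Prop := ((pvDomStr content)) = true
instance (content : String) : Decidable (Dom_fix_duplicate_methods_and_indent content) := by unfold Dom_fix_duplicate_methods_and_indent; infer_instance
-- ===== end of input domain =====

-- B fuses A's two passes (duplicate-def removal, then indentation fix) into one traversal: simpler, one list built, one join.

-- ===== PORT A =====
-- line.split('(')[0].strip()  (split('(') always returns a nonempty list, so [0] never raises)
def pvA_methodName (line : List Char) : List Char :=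
  PySem.Chars.strip ((PySem.Chars.splitOn line ['(']).headD [])

-- first while-loop of A: skip an empty '    def …:' when the next line is the same method's real def
def pvA_pass1 : List (List Char) → List (List Char)
  | [] => []
  | l :: rest =>
    let line := PySem.Chars.rstrip l
    if PySem.Chars.startswith line "    def ".toList
        && PySem.Chars.endswith line [':']
        && !PySem.Chars.endswith line ['"','"','"'] then
      let mname := pvA_methodName line
      match rest with
      | next :: _ =>
        let nl := PySem.Chars.rstrip next
        if PySem.Chars.startswith nl "    def ".toList
            && (pvA_methodName nl == mname)
            && PySem.Chars.isIn ['"','"','"'] nl then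
          pvA_pass1 rest
        else l :: pvA_pass1 rest
      | [] => l :: pvA_pass1 rest
    else l :: pvA_pass1 rest

-- second for-loop of A: the indentation fix with the in_method flag
def pvA_pass2 : Bool → List (List Char) → List (List Char)
  | _, [] => []
  | inm, l :: rest =>
    let stripped := PySem.Chars.rstrip l
    if stripped.isEmpty then [] :: pvA_pass2 inm rest
    else if PySem.Chars.startswith stripped "    def ".toList then l :: pvA_pass2 true rest
    else if PySem.Chars.startswith stripped "class ".toList then l :: pvA_pass2 false rest
    else if inm && !stripped.isEmpty && !PySem.Chars.startswith stripped "    ".toList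
            && !PySem.Chars.startswith stripped "        ".toList then
      ("        ".toList ++ PySem.Chars.lstrip stripped) :: pvA_pass2 inm rest
    else l :: pvA_pass2 inm rest

def fix_duplicate_methods_and_indent (content : String) : String :=
  let lines := PySem.Chars.splitOn content.toList ['\n']
  let content2 := PySem.Chars.join ['\n'] (pvA_pass1 lines)
  let lines2 := PySem.Chars.splitOn content2 ['\n']
  String.ofList (PySem.Chars.join ['\n'] (pvA_pass2 false lines2))

-- ===== PORT B =====
-- B's duplicate test: current rstripped line is an empty '    def …:' and the next line is the real def
def pvB_isDup (line : List Char) (rest : List (List Char)) : Bool :=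
  PySem.Chars.startswith line "    def ".toList
    && PySem.Chars.endswith line [':']
    && (match rest with
        | next :: _ =>
          let nl := PySem.Chars.rstrip next
          PySem.Chars.startswith nl "    def ".toList
            && (PySem.Chars.strip ((PySem.Chars.splitOn nl ['(']).headD [])
                  == PySem.Chars.strip ((PySem.Chars.splitOn line ['(']).headD []))
            && PySem.Chars.isIn ['"','"','"'] nl
        | [] => false)

-- B's single fused loop over the lines
def pvB_fix : Bool → List (List Char) → List (List Char)
  | _, [] => []
  | inm, raw :: rest =>
    let line := PySem.Chars.rstrip raw
    if pvB_isDup line rest then pvB_fix inm rest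
    else if line.isEmpty then [] :: pvB_fix inm rest
    else if PySem.Chars.startswith line "    def ".toList then raw :: pvB_fix true rest
    else if PySem.Chars.startswith line "class ".toList then raw :: pvB_fix false rest
    else if inm && !PySem.Chars.startswith line "    ".toList then
      ("        ".toList ++ PySem.Chars.lstrip line) :: pvB_fix inm rest
    else raw :: pvB_fix inm rest

def fix_duplicate_methods_and_indent_alt (content : String) : String :=
  String.ofList (PySem.Chars.join ['\n'] (pvB_fix false (PySem.Chars.splitOn content.toList ['\n'])))

-- ===== PRECONDITION & SPEC =====
def Spec_fix_duplicate_methods_and_indent (content : String) (out : String) : Prop := out = fix_duplicate_methods_and_indent_alt content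
instance (content : String) (out : String) : Decidable (Spec_fix_duplicate_methods_and_indent content out) := by unfold Spec_fix_duplicate_methods_and_indent; infer_instance

-- ===== CLAIM (what is proved, stated in full; the proofs are below) =====
def Claim_equal_fix_duplicate_methods_and_indent : Prop := ∀ (content : String), Dom_fix_duplicate_methods_and_indent content → Spec_fix_duplicate_methods_and_indent content (fix_duplicate_methods_and_indent content)

-- ===== LEMMAS AND PROOFS =====

-- go on the empty remainder returns the accumulated pieces, at every fuel
theorem pv_go_nil (fuel : Nat) (cur : List Char) (acc : List (List Char)) :
    PySem.Chars.splitOn.go ['\n'] fuel [] cur acc = acc.reverse ++ [cur.reverse] := by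
  cases fuel <;> simp [PySem.Chars.splitOn.go]

-- go scans a newline-free chunk into cur, independent of fuel
theorem pv_go_free (y : List Char) (h : '\n' ∉ y) :
    ∀ (fuel : Nat) (l : List Char) (cur : List Char) (acc : List (List Char)),
    PySem.Chars.splitOn.go ['\n'] fuel (y ++ l) cur acc
      = PySem.Chars.splitOn.go ['\n'] (fuel - y.length) l (y.reverse ++ cur) acc := by
  induction y with
  | nil => intro fuel l cur acc; simp
  | cons c y' ih =>
    intro fuel l cur acc
    have hc : c ≠ '\n' := by intro hc; exact h (by simp [hc])
    have h' : '\n' ∉ y' := fun hm => h (List.mem_cons_of_mem _ hm)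
    cases fuel with
    | zero =>
      rw [PySem.Chars.splitOn.go.eq_def, PySem.Chars.splitOn.go.eq_def]
      simp
    | succ f =>
      rw [PySem.Chars.splitOn.go.eq_def]
      have hp : List.isPrefixOf ['\n'] (c :: (y' ++ l)) = false := by
        simp [List.isPrefixOf]; exact fun hh => absurd hh.symm hc
      simp only [List.cons_append, hp, Bool.false_eq_true]
      rw [ih h' f l (c :: cur) acc]
      simp [List.append_assoc]

-- splitting the join of nonempty, newline-free pieces returns exactly the pieces
theorem pv_go_join (ys : List (List Char)) (hne : ys ≠ [])
    (hclean : ∀ y ∈ ys, '\n' ∉ y) :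
    ∀ (fuel : Nat) (acc : List (List Char)),
    (PySem.Chars.join ['\n'] ys).length + 1 ≤ fuel →
    PySem.Chars.splitOn.go ['\n'] fuel (PySem.Chars.join ['\n'] ys) [] acc = acc.reverse ++ ys := by
  induction ys with
  | nil => exact absurd rfl hne
  | cons y ys ih =>
    intro fuel acc hf
    cases ys with
    | nil =>
      have : PySem.Chars.join ['\n'] [y] = y := by simp [PySem.Chars.join, List.intercalate]
      rw [this] at hf ⊢
      have := pv_go_free y (hclean y (by simp)) fuel [] [] acc
      simpa [pv_go_nil] using this
    | cons z zs =>
      have hj : PySem.Chars.join ['\n'] (y :: z :: zs)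
          = y ++ ('\n' :: PySem.Chars.join ['\n'] (z :: zs)) := by
        simp [PySem.Chars.join, List.intercalate]
      rw [hj] at hf ⊢
      rw [pv_go_free y (hclean y (by simp)) fuel _ [] acc]
      have hlen : y.length + (PySem.Chars.join ['\n'] (z :: zs)).length + 2 ≤ fuel := by
        simp [List.length_append] at hf; omega
      obtain ⟨f, hfe⟩ : ∃ f, fuel - y.length = f + 1 := ⟨fuel - y.length - 1, by omega⟩
      rw [hfe, PySem.Chars.splitOn.go.eq_def]
      have hp : List.isPrefixOf ['\n'] ('\n' :: PySem.Chars.join ['\n'] (z :: zs)) = true := by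
        simp [List.isPrefixOf]
      simp only [hp, if_pos, List.length_cons, List.length_nil, List.drop_succ_cons,
        List.drop_zero, List.append_nil, List.reverse_reverse]
      rw [ih (by simp) (fun w hw => hclean w (List.mem_cons_of_mem _ hw)) f (y :: acc) (by omega)]
      simp

-- the list of pieces produced by go is never empty
theorem pv_go_ne_nil : ∀ (fuel : Nat) (l cur : List Char) (acc : List (List Char)),
    PySem.Chars.splitOn.go ['\n'] fuel l cur acc ≠ [] := by
  intro fuel
  induction fuel with
  | zero => intro l cur acc; simp [PySem.Chars.splitOn.go]
  | succ f ih =>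
    intro l cur acc
    cases l with
    | nil => simp [PySem.Chars.splitOn.go]
    | cons c restc =>
      rw [PySem.Chars.splitOn.go.eq_def]
      dsimp only
      split
      · exact ih _ _ _
      · exact ih _ _ _

-- every piece produced by go on separator '\n' is newline-free
theorem pv_go_clean : ∀ (l : List Char) (fuel : Nat) (cur : List Char) (acc : List (List Char)),
    l.length + 1 ≤ fuel → '\n' ∉ cur → (∀ p ∈ acc, '\n' ∉ p) →
    ∀ p ∈ PySem.Chars.splitOn.go ['\n'] fuel l cur acc, '\n' ∉ p := by
  intro l
  induction l with
  | nil =>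
    intro fuel cur acc _ hcur hacc p hp
    rw [pv_go_nil] at hp
    simp only [List.mem_append, List.mem_reverse, List.mem_singleton] at hp
    rcases hp with hp | hp
    · exact hacc p hp
    · subst hp; simp [hcur]
  | cons c restc ih =>
    intro fuel cur acc hf hcur hacc p hp
    obtain ⟨f, rfl⟩ : ∃ f, fuel = f + 1 := ⟨fuel - 1, by omega⟩
    rw [PySem.Chars.splitOn.go.eq_def] at hp
    by_cases hc : c = '\n'
    · subst hc
      have hpre : List.isPrefixOf ['\n'] ('\n' :: restc) = true := by simp [List.isPrefixOf]
      simp only [hpre, if_pos] at hp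
      refine ih f [] (cur.reverse :: acc) (by simp at hf ⊢; omega) (by simp) ?_ p ?_
      · intro q hq
        rcases List.mem_cons.mp hq with rfl | hq
        · simp [hcur]
        · exact hacc q hq
      · simpa using hp
    · have hpre : List.isPrefixOf ['\n'] (c :: restc) = false := by
        simp [List.isPrefixOf]; exact fun hh => absurd hh.symm hc
      simp only [hpre, Bool.false_eq_true] at hp
      refine ih f (c :: cur) acc (by simp at hf ⊢; omega) ?_ hacc p hp
      intro hq
      rcases List.mem_cons.mp hq with hq | hq
      · exact hc hq.symm
      · exact hcur hq

theorem pv_splitOn_clean (cs : List Char) : ∀ p ∈ PySem.Chars.splitOn cs ['\n'], '\n' ∉ p := by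
  intro p hp
  rw [PySem.Chars.splitOn] at hp
  exact pv_go_clean cs (cs.length + 1) [] [] (le_refl _) (by simp) (by simp) p hp

theorem pv_splitOn_ne_nil (cs : List Char) : PySem.Chars.splitOn cs ['\n'] ≠ [] := by
  rw [PySem.Chars.splitOn]; exact pv_go_ne_nil _ _ _ _

-- splitting on '\n' inverts joining newline-free pieces
theorem pv_roundtrip (ys : List (List Char)) (hne : ys ≠ []) (hclean : ∀ y ∈ ys, '\n' ∉ y) :
    PySem.Chars.splitOn (PySem.Chars.join ['\n'] ys) ['\n'] = ys := by
  rw [PySem.Chars.splitOn]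
  simpa using pv_go_join ys hne hclean _ [] (le_refl _)

-- pass1 only selects lines of its input
theorem pv_pass1_mem : ∀ (xs : List (List Char)) (p : List Char), p ∈ pvA_pass1 xs → p ∈ xs := by
  intro xs
  induction xs with
  | nil => intro p hp; simp [pvA_pass1] at hp
  | cons l rest ih =>
    intro p hp
    cases rest with
    | nil =>
      simp only [pvA_pass1] at hp
      split at hp <;> simp_all
    | cons next t =>
      simp only [pvA_pass1] at hp
      split at hp
      · split at hp
        · exact List.mem_cons_of_mem _ (ih p hp)
        · rcases List.mem_cons.mp hp with rfl | hp
          · exact List.mem_cons_self ..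
          · exact List.mem_cons_of_mem _ (ih p hp)
      · rcases List.mem_cons.mp hp with rfl | hp
        · exact List.mem_cons_self ..
        · exact List.mem_cons_of_mem _ (ih p hp)

-- pass1 keeps at least the last line
theorem pv_pass1_ne_nil : ∀ (rest : List (List Char)) (l : List Char), pvA_pass1 (l :: rest) ≠ [] := by
  intro rest
  induction rest with
  | nil => intro l; simp only [pvA_pass1]; split <;> simp
  | cons next t ih =>
    intro l
    simp only [pvA_pass1]
    split
    · split
      · exact ih next
      · simp
    · simp

-- a line cannot end in ':' and in three quotes at once
theorem pv_not_ew3 (line : List Char) (h : PySem.Chars.endswith line [':'] = true) :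
    PySem.Chars.endswith line ['\"','\"','\"'] = false := by
  by_contra h'
  rw [Bool.not_eq_false, PySem.Chars.endswith_iff] at h'
  rw [PySem.Chars.endswith_iff] at h
  obtain ⟨u, hu⟩ := h
  obtain ⟨v, hv⟩ := h'
  rw [← hv] at hu
  have := congrArg List.getLast? hu
  simp at this

-- no 4-space prefix implies no 8-space prefix
theorem pv_sw8 (line : List Char)
    (h : PySem.Chars.startswith line [' ',' ',' ',' '] = false) :
    PySem.Chars.startswith line [' ',' ',' ',' ',' ',' ',' ',' '] = false := by
  by_contra h'
  rw [Bool.not_eq_false, PySem.Chars.startswith_iff] at h'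
  rw [← Bool.not_eq_true, PySem.Chars.startswith_iff] at h
  exact h (List.IsPrefix.trans (by decide) h')

-- A keeps the current line whenever B's duplicate test fails
theorem pv_pass1_keep (l : List Char) (rest : List (List Char))
    (h : pvB_isDup (PySem.Chars.rstrip l) rest = false) :
    pvA_pass1 (l :: rest) = l :: pvA_pass1 rest := by
  cases rest with
  | nil => simp only [pvA_pass1]; split <;> rfl
  | cons next t =>
    by_cases h1 : PySem.Chars.startswith (PySem.Chars.rstrip l) [' ',' ',' ',' ','d','e','f',' '] = true
    · by_cases h2 : PySem.Chars.endswith (PySem.Chars.rstrip l) [':'] = true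
      · have h4 := pv_not_ew3 _ h2
        by_cases h3a : PySem.Chars.startswith (PySem.Chars.rstrip next) [' ',' ',' ',' ','d','e','f',' '] = true
        · by_cases h3b : PySem.Chars.strip ((PySem.Chars.splitOn (PySem.Chars.rstrip next) ['(']).head?.getD [])
              = PySem.Chars.strip ((PySem.Chars.splitOn (PySem.Chars.rstrip l) ['(']).head?.getD [])
          · by_cases h3c : PySem.Chars.isIn ['\"','\"','\"'] (PySem.Chars.rstrip next) = true
            · exfalso
              have hT : pvB_isDup (PySem.Chars.rstrip l) (next :: t) = true := by
                simp [pvB_isDup, h1, h2, h3a, h3b, h3c]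
              exact Bool.false_ne_true (h.symm.trans hT)
            · rw [Bool.not_eq_true] at h3c
              simp [pvA_pass1, pvA_methodName, h1, h2, h4, h3c]
          · simp [pvA_pass1, pvA_methodName, h1, h2, h4, h3b]
        · rw [Bool.not_eq_true] at h3a
          simp [pvA_pass1, pvA_methodName, h1, h2, h4, h3a]
      · rw [Bool.not_eq_true] at h2
        simp [pvA_pass1, h1, h2]
    · rw [Bool.not_eq_true] at h1
      simp [pvA_pass1, h1]

-- B's fused loop equals A's pass2 after A's pass1
theorem pv_fuse : ∀ (xs : List (List Char)) (inm : Bool),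
    pvB_fix inm xs = pvA_pass2 inm (pvA_pass1 xs) := by
  intro xs
  induction xs with
  | nil => intro inm; rfl
  | cons l rest ih =>
    intro inm
    by_cases hdup : pvB_isDup (PySem.Chars.rstrip l) rest = true
    · obtain ⟨next, t, rfl⟩ : ∃ next t, rest = next :: t := by
        cases rest with
        | nil => simp [pvB_isDup] at hdup
        | cons a b => exact ⟨a, b, rfl⟩
      have hdup0 := hdup
      simp [pvB_isDup] at hdup
      obtain ⟨⟨h1, h2⟩, ⟨h3a, h3b⟩, h3c⟩ := hdup
      have h4 := pv_not_ew3 _ (by simpa using h2)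
      have hB : pvB_fix inm (l :: next :: t) = pvB_fix inm (next :: t) := by
        simp [pvB_fix, hdup0]
      have hA : pvA_pass1 (l :: next :: t) = pvA_pass1 (next :: t) := by
        simp [pvA_pass1, pvA_methodName, h1, h2, h3a, h3b, h3c, h4]
      rw [hB, hA, ih inm]
    · rw [Bool.not_eq_true] at hdup
      rw [pv_pass1_keep l rest hdup]
      by_cases he : PySem.Chars.rstrip l = []
      · rw [he] at hdup
        simp [pvB_fix, pvA_pass2, hdup, he, ih inm]
      · by_cases hd : PySem.Chars.startswith (PySem.Chars.rstrip l) [' ',' ',' ',' ','d','e','f',' '] = true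
        · simp [pvB_fix, pvA_pass2, hdup, he, hd, ih true]
        · rw [Bool.not_eq_true] at hd
          by_cases hc : PySem.Chars.startswith (PySem.Chars.rstrip l) ['c','l','a','s','s',' '] = true
          · simp [pvB_fix, pvA_pass2, hdup, he, hd, hc, ih false]
          · rw [Bool.not_eq_true] at hc
            by_cases h4 : PySem.Chars.startswith (PySem.Chars.rstrip l) [' ',' ',' ',' '] = true
            · simp [pvB_fix, pvA_pass2, hdup, he, hd, hc, h4, ih inm]
            · rw [Bool.not_eq_true] at h4
              have h8 := pv_sw8 _ h4
              simp [pvB_fix, pvA_pass2, hdup, he, hd, hc, h4, h8, ih inm]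

-- ===== VERDICT (by name: the statement is the Claim_ definition above) =====
theorem fix_duplicate_methods_and_indent_spec : Claim_equal_fix_duplicate_methods_and_indent := by
  intro content _
  unfold Spec_fix_duplicate_methods_and_indent
  unfold fix_duplicate_methods_and_indent fix_duplicate_methods_and_indent_alt
  show String.ofList (PySem.Chars.join ['\n'] (pvA_pass2 false
      (PySem.Chars.splitOn (PySem.Chars.join ['\n']
        (pvA_pass1 (PySem.Chars.splitOn content.toList ['\n']))) ['\n'])))
    = String.ofList (PySem.Chars.join ['\n'] (pvB_fix false (PySem.Chars.splitOn content.toList ['\n'])))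
  have hclean := pv_splitOn_clean content.toList
  have hPne : pvA_pass1 (PySem.Chars.splitOn content.toList ['\n']) ≠ [] := by
    rcases hL : PySem.Chars.splitOn content.toList ['\n'] with _ | ⟨a, b⟩
    · exact absurd hL (pv_splitOn_ne_nil content.toList)
    · exact pv_pass1_ne_nil b a
  have hPclean : ∀ p ∈ pvA_pass1 (PySem.Chars.splitOn content.toList ['\n']), '\n' ∉ p :=
    fun p hp => hclean p (pv_pass1_mem _ p hp)
  rw [pv_roundtrip _ hPne hPclean, ← pv_fuse]
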